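-- pv_equiv track=rewrite | github.com/conJUSTover/GeneConversion | GC_filter.py | process_indel
-- ===== SOURCE A (Python) =====
-- def process_indel(max_beg, min_beg, min_end, max_end, indels):
--     max_indel = [i for i in indels if i[1] > int(max_beg) and i[1] < int(max_end)]
--     max_count = len(max_indel)
--     max_len = sum([i[2] for i in max_indel])
--     min_indel = [i for i in max_indel if i[1] > int(min_beg) and i[1] < int(min_end)]
--     min_count = len(min_indel)
--     min_len = sum([i[2] for i in min_indel])
--     return min_count, min_len, max_count, max_len
-- ===== SOURCE B (Python) =====
-- def process_indel(max_beg, min_beg, min_end, max_end, indels):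
--     Mb, mb, me, Me = int(max_beg), int(min_beg), int(min_end), int(max_end)
--     min_count = min_len = max_count = max_len = 0
--     for i in indels:
--         if Mb < i[1] < Me:
--             max_count += 1
--             max_len += i[2]
--             if mb < i[1] < me:
--                 min_count += 1
--                 min_len += i[2]
--     return min_count, min_len, max_count, max_len
-- ===== Notes on version B (the rewrite author's own statement) =====
-- stated objective: alternative
-- what changed: Replaces the four-pass list-building approach (two filtered intermediate lists, len and sum over each) with a single accumulating pass over indels maintaining the four counters directly, so no intermediate lists are built.
import Mathlib
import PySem

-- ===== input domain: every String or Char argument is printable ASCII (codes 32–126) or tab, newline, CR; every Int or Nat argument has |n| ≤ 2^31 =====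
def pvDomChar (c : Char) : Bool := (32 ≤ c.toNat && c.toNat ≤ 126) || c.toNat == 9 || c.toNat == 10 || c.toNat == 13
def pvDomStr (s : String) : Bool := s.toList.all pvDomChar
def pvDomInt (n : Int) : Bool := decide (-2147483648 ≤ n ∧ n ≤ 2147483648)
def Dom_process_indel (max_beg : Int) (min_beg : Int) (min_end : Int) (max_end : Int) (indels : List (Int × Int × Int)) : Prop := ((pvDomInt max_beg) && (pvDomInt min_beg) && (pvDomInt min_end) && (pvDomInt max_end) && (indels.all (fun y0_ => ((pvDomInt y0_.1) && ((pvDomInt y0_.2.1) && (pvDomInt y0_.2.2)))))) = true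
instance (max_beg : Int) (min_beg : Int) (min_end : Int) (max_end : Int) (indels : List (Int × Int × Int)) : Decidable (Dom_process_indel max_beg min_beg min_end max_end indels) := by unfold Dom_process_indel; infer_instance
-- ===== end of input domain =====

-- B replaces A's four-pass list-building computation with one accumulating pass (alternative decomposition, same complexity).

-- ===== PORT A =====
def process_indel (max_beg : Int) (min_beg : Int) (min_end : Int) (max_end : Int) (indels : List (Int × Int × Int)) : Int × Int × Int × Int :=
  let max_indel := indels.filter (fun i => i.2.1 > max_beg && i.2.1 < max_end)
  let max_count : Int := max_indel.length
  let max_len : Int := (max_indel.map (fun i => i.2.2)).sum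
  let min_indel := max_indel.filter (fun i => i.2.1 > min_beg && i.2.1 < min_end)
  let min_count : Int := min_indel.length
  let min_len : Int := (min_indel.map (fun i => i.2.2)).sum
  (min_count, min_len, max_count, max_len)

-- ===== PORT B =====
def process_indel_alt (max_beg : Int) (min_beg : Int) (min_end : Int) (max_end : Int) (indels : List (Int × Int × Int)) : Int × Int × Int × Int :=
  indels.foldl
    (fun (acc : Int × Int × Int × Int) i =>
      if max_beg < i.2.1 ∧ i.2.1 < max_end then
        let acc' := (acc.1, acc.2.1, acc.2.2.1 + 1, acc.2.2.2 + i.2.2)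
        if min_beg < i.2.1 ∧ i.2.1 < min_end then
          (acc'.1 + 1, acc'.2.1 + i.2.2, acc'.2.2.1, acc'.2.2.2)
        else acc'
      else acc)
    (0, 0, 0, 0)

-- ===== PRECONDITION & SPEC =====
def Spec_process_indel (max_beg : Int) (min_beg : Int) (min_end : Int) (max_end : Int) (indels : List (Int × Int × Int)) (out : Int × Int × Int × Int) : Prop := out = process_indel_alt max_beg min_beg min_end max_end indels
instance (max_beg : Int) (min_beg : Int) (min_end : Int) (max_end : Int) (indels : List (Int × Int × Int)) (out : Int × Int × Int × Int) : Decidable (Spec_process_indel max_beg min_beg min_end max_end indels out) := by unfold Spec_process_indel; infer_instance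

-- ===== CLAIM (what is proved, stated in full; the proofs are below) =====
def Claim_equal_process_indel : Prop := ∀ (max_beg : Int) (min_beg : Int) (min_end : Int) (max_end : Int) (indels : List (Int × Int × Int)), Dom_process_indel max_beg min_beg min_end max_end indels → Spec_process_indel max_beg min_beg min_end max_end indels (process_indel max_beg min_beg min_end max_end indels)

-- ===== LEMMAS AND PROOFS =====

-- loop invariant: the fold from an arbitrary accumulator adds A's four quantities componentwise
theorem fold_invariant (max_beg min_beg min_end max_end : Int) (indels : List (Int × Int × Int))
    (a b c d : Int) :
    indels.foldl
      (fun (acc : Int × Int × Int × Int) i =>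
        if max_beg < i.2.1 ∧ i.2.1 < max_end then
          let acc' := (acc.1, acc.2.1, acc.2.2.1 + 1, acc.2.2.2 + i.2.2)
          if min_beg < i.2.1 ∧ i.2.1 < min_end then
            (acc'.1 + 1, acc'.2.1 + i.2.2, acc'.2.2.1, acc'.2.2.2)
          else acc'
        else acc)
      (a, b, c, d)
    = (let M := indels.filter (fun i => i.2.1 > max_beg && i.2.1 < max_end)
       let m := M.filter (fun i => i.2.1 > min_beg && i.2.1 < min_end)
       (a + m.length, b + (m.map (fun i => i.2.2)).sum,
        c + M.length, d + (M.map (fun i => i.2.2)).sum)) := by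
  induction indels generalizing a b c d with
  | nil => simp
  | cons x xs ih =>
    simp only [List.foldl_cons]
    by_cases hM : max_beg < x.2.1 ∧ x.2.1 < max_end
    · have h1 : (x.2.1 > max_beg && x.2.1 < max_end) = true := by simp [hM.1, hM.2]
      by_cases hm : min_beg < x.2.1 ∧ x.2.1 < min_end
      · have h2 : (x.2.1 > min_beg && x.2.1 < min_end) = true := by simp [hm.1, hm.2]
        rw [if_pos hM, if_pos hm, ih]
        simp only [List.filter_cons, h1, h2, if_true]
        simp only [List.length_cons, List.map_cons, List.sum_cons]
        push_cast
        refine Prod.ext (by ring) (Prod.ext (by ring) (Prod.ext (by ring) (by ring)))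
      · have h2 : (x.2.1 > min_beg && x.2.1 < min_end) = false := by
          rcases not_and_or.mp hm with h | h <;> simp [h]
        rw [if_pos hM, if_neg hm, ih]
        simp only [List.filter_cons, h1, h2, if_true, Bool.false_eq_true, if_false]
        simp only [List.length_cons, List.map_cons, List.sum_cons]
        push_cast
        refine Prod.ext (by ring) (Prod.ext (by ring) (Prod.ext (by ring) (by ring)))
    · have h1 : (x.2.1 > max_beg && x.2.1 < max_end) = false := by
        rcases not_and_or.mp hM with h | h <;> simp [h]
      rw [if_neg hM, ih]
      simp only [List.filter_cons, h1, Bool.false_eq_true, if_false]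

-- ===== VERDICT (by name: the statement is the Claim_ definition above) =====
theorem process_indel_spec : Claim_equal_process_indel := by
  intro max_beg min_beg min_end max_end indels _
  unfold Spec_process_indel process_indel process_indel_alt
  rw [fold_invariant]
  simp
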